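-- pv_equiv track=rewrite | github.com/Kappeki/ByteBoardGame | utils.py | get_clicked_tile_position
-- ===== SOURCE A (Python) =====
-- def get_clicked_tile_position(x, y, board_size, tile_size):
--     row, column = [
--         (row, column)
--         for row in range(board_size)
--         for column in range(board_size)
--         if column*tile_size <= x <= (column+1)*tile_size and row*tile_size <= y <= (row+1)*tile_size
--     ][0]
--     return row, column
-- ===== SOURCE B (Python) =====
-- def get_clicked_tile_position(x, y, board_size, tile_size):
--     # O(1): validate the click is on the board, then take the ceiling-division
--     # cell (clamped at 0), which is the first matching row/column.
--     if tile_size <= 0 or board_size <= 0 or \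
--        not (0 <= x <= board_size * tile_size and 0 <= y <= board_size * tile_size):
--         raise IndexError("click outside the board")
--     row = max(0, -(-y // tile_size) - 1)
--     column = max(0, -(-x // tile_size) - 1)
--     return row, column
-- ===== Notes on version B (the rewrite author's own statement) =====
-- stated objective: faster
-- what changed: Replaces the O(board_size^2) comprehension scan over all cells with a range check plus two O(1) closed-form ceiling divisions (clamped at 0) that compute the first matching row and column directly.
-- outside the precondition, e.g. on get_clicked_tile_position(0, 0, 1, 0): A returns (0, 0), B raises IndexError
import Mathlib
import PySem

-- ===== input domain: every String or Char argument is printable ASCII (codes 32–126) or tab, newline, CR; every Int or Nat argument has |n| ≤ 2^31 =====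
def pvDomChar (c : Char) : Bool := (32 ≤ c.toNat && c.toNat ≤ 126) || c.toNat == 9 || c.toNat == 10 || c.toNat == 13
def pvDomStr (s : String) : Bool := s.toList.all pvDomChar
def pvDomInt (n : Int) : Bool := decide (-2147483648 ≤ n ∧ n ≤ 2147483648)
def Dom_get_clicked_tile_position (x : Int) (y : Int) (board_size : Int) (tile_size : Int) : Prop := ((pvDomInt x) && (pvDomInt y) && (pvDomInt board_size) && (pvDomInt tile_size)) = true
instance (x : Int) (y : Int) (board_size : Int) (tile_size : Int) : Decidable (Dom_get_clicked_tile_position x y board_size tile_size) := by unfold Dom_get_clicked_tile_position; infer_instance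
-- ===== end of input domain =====

-- B replaces A's O(board_size^2) scan over all cells with a range check and two
-- O(1) clamped ceiling divisions; equivalence is proved on exactly the inputs where
-- A returns (excluding the degenerate tile_size = 0 corner, where B raises).

-- ===== PORT A =====
-- A: list comprehension over all (row, column) pairs, filtered; [0] raises IndexError
-- on an empty list (excluded by Pre_); here the empty case returns [].
def get_clicked_tile_position (x : Int) (y : Int) (board_size : Int) (tile_size : Int) : List Int :=
  let cands : List (Int × Int) :=
    (PySem.List.pyRange 0 board_size 1).flatMap (fun row =>
      (PySem.List.pyRange 0 board_size 1).filterMap (fun column =>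
        if column * tile_size ≤ x ∧ x ≤ (column + 1) * tile_size ∧
           row * tile_size ≤ y ∧ y ≤ (row + 1) * tile_size
        then some (row, column) else none))
  match cands.head? with
  | some (r, c) => [r, c]
  | none => []

-- ===== PORT B =====
-- B raises IndexError on the guard (returns [] here; those inputs are outside Pre_).
def get_clicked_tile_position_alt (x : Int) (y : Int) (board_size : Int) (tile_size : Int) : List Int :=
  if tile_size ≤ 0 ∨ board_size ≤ 0 ∨
     ¬ (0 ≤ x ∧ x ≤ board_size * tile_size ∧ 0 ≤ y ∧ y ≤ board_size * tile_size)
  then []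
  else
    let row := max 0 (-(PySem.Int.floordiv (-y) tile_size) - 1)
    let column := max 0 (-(PySem.Int.floordiv (-x) tile_size) - 1)
    [row, column]

-- ===== PRECONDITION & SPEC =====
-- Pre_ is exactly where A returns, except the degenerate input family
-- tile_size = 0 ∧ x = y = 0 ∧ board_size ≥ 1, on which A returns (0, 0)
-- but B's ceiling division raises ZeroDivisionError.
def Pre_get_clicked_tile_position (x : Int) (y : Int) (board_size : Int) (tile_size : Int) : Prop :=
  0 < tile_size ∧ 1 ≤ board_size ∧
  0 ≤ x ∧ x ≤ board_size * tile_size ∧ 0 ≤ y ∧ y ≤ board_size * tile_size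
instance (x : Int) (y : Int) (board_size : Int) (tile_size : Int) : Decidable (Pre_get_clicked_tile_position x y board_size tile_size) := by unfold Pre_get_clicked_tile_position; infer_instance

def pvWitness_get_clicked_tile_position : Int × Int × Int × Int := (5, 13, 4, 4)

def Spec_get_clicked_tile_position (x : Int) (y : Int) (board_size : Int) (tile_size : Int) (out : List Int) : Prop := out = get_clicked_tile_position_alt x y board_size tile_size
instance (x : Int) (y : Int) (board_size : Int) (tile_size : Int) (out : List Int) : Decidable (Spec_get_clicked_tile_position x y board_size tile_size out) := by unfold Spec_get_clicked_tile_position; infer_instance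

-- ===== CLAIM (what is proved, stated in full; the proofs are below) =====
def Claim_equal_get_clicked_tile_position : Prop := ∀ (x : Int) (y : Int) (board_size : Int) (tile_size : Int), Dom_get_clicked_tile_position x y board_size tile_size → Pre_get_clicked_tile_position x y board_size tile_size → Spec_get_clicked_tile_position x y board_size tile_size (get_clicked_tile_position x y board_size tile_size)

-- ===== LEMMAS AND PROOFS =====

-- head? of filterMap-of-ite equals head? of filter, mapped.
theorem pv_head_filterMap_ite {α β : Type} (q : α → Prop) [DecidablePred q] (f : α → β) :
    ∀ (xs : List α),
      (xs.filterMap (fun c => if q c then some (f c) else none)).head? =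
      (xs.filter (fun c => decide (q c))).head?.map f := by
  intro xs
  induction xs with
  | nil => simp
  | cons a t ih =>
    by_cases h : q a
    · simp [h]
    · simp [h, ih]

-- first element of a filtered integer range: the least m satisfying p.
theorem pv_head_filter_pyRange (p : Int → Prop) [DecidablePred p] :
    ∀ (n : Nat) (a b m : Int), b - a = (n : Int) → a ≤ m → m < b → p m →
      (∀ k, a ≤ k → k < m → ¬ p k) →
      ((PySem.List.pyRange a b 1).filter (fun c => decide (p c))).head? = some m := by
  intro n
  induction n with
  | zero => intro a b m hn h1 h2 _ _; omega
  | succ n ih =>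
    intro a b m hn h1 h2 hp hmin
    rw [PySem.List.pyRange_one_cons (by omega)]
    by_cases ha : a = m
    · subst ha; simp [hp]
    · have hna : ¬ p a := hmin a le_rfl (by omega)
      rw [List.filter_cons, if_neg (by simp [hna])]
      exact ih (a + 1) b m (by omega) (by omega) h2 hp (fun k hk1 hk2 => hmin k (by omega) hk2)

-- first nonempty image in a flatMap over an integer range.
theorem pv_head_flatMap_pyRange {β : Type} (g : Int → List β) :
    ∀ (n : Nat) (a b m : Int) (v : β), b - a = (n : Int) → a ≤ m → m < b →
      (g m).head? = some v →
      (∀ k, a ≤ k → k < m → g k = []) →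
      ((PySem.List.pyRange a b 1).flatMap g).head? = some v := by
  intro n
  induction n with
  | zero => intro a b m v hn h1 h2 _ _; omega
  | succ n ih =>
    intro a b m v hn h1 h2 hv hmin
    rw [PySem.List.pyRange_one_cons (by omega)]
    by_cases ha : a = m
    · subst ha
      rw [List.flatMap_cons, List.head?_append, hv]
      simp
    · have hnil : g a = [] := hmin a le_rfl (by omega)
      rw [List.flatMap_cons, hnil, List.nil_append]
      exact ih (a + 1) b m v (by omega) (by omega) h2 hv (fun k hk1 hk2 => hmin k (by omega) hk2)

-- ceiling-cell arithmetic: r0 = max 0 (⌈y/ts⌉ - 1) is the least row containing y.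
theorem pv_cell_bounds (y bs ts : Int) (hts : 0 < ts) (hbs : 1 ≤ bs)
    (hy0 : 0 ≤ y) (hy1 : y ≤ bs * ts) :
    let r0 := max 0 (-(PySem.Int.floordiv (-y) ts) - 1)
    0 ≤ r0 ∧ r0 < bs ∧ r0 * ts ≤ y ∧ y ≤ (r0 + 1) * ts ∧
    (∀ k, 0 ≤ k → k < r0 → ¬ (k * ts ≤ y ∧ y ≤ (k + 1) * ts)) := by
  intro r0
  set c := -(PySem.Int.floordiv (-y) ts) with hc
  have hch : (c - 1) * ts < y ∧ y ≤ c * ts :=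
    (PySem.Int.neg_floordiv_neg_eq_iff_of_pos hts).mp hc.symm
  have hr0 : r0 = max 0 (c - 1) := rfl
  by_cases hy : y = 0
  · subst hy
    have hc0 : c = 0 := by nlinarith [hch.1, hch.2]
    refine ⟨by omega, by simp [hr0, hc0]; omega, ?_, ?_, ?_⟩
    · simp [hr0, hc0]
    · simp [hr0, hc0]; omega
    · intro k hk1 hk2; simp [hr0, hc0] at hk2; omega
  · have hypos : 0 < y := by omega
    have hc1 : 1 ≤ c := by nlinarith [hch.2]
    have hr0' : r0 = c - 1 := by omega
    refine ⟨by omega, ?_, ?_, ?_, ?_⟩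
    · -- r0 < bs : (c-1)*ts < y ≤ bs*ts → c-1 < bs
      rw [hr0']
      by_contra h
      have : bs ≤ c - 1 := by omega
      nlinarith [hch.1]
    · rw [hr0']; exact le_of_lt hch.1
    · rw [hr0']
      have h : (c - 1 + 1) * ts = c * ts := by ring
      rw [h]; exact hch.2
    · intro k hk1 hk2 ⟨_, hk4⟩
      rw [hr0'] at hk2
      have : (k + 1) * ts ≤ (c - 1) * ts :=
        mul_le_mul_of_nonneg_right (by omega) (le_of_lt hts)
      nlinarith [hch.1]

-- ===== VERDICT (by name: the statement is the Claim_ definition above) =====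
theorem get_clicked_tile_position_spec : Claim_equal_get_clicked_tile_position := by
  intro x y bs ts _ hpre
  obtain ⟨hts, hbs, hx0, hx1, hy0, hy1⟩ := hpre
  unfold Spec_get_clicked_tile_position get_clicked_tile_position get_clicked_tile_position_alt
  rw [if_neg (by push_neg; refine ⟨by omega, by omega, hx0, hx1, hy0, hy1⟩)]
  obtain ⟨hr0, hrbs, hr1, hr2, hrmin⟩ := pv_cell_bounds y bs ts hts hbs hy0 hy1
  obtain ⟨hc0, hcbs, hc1, hc2, hcmin⟩ := pv_cell_bounds x bs ts hts hbs hx0 hx1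
  set r0 := max 0 (-(PySem.Int.floordiv (-y) ts) - 1) with hr0def
  set c0 := max 0 (-(PySem.Int.floordiv (-x) ts) - 1) with hc0def
  have hhead :
      ((PySem.List.pyRange 0 bs 1).flatMap (fun row =>
        (PySem.List.pyRange 0 bs 1).filterMap (fun column =>
          if column * ts ≤ x ∧ x ≤ (column + 1) * ts ∧
             row * ts ≤ y ∧ y ≤ (row + 1) * ts
          then some (row, column) else none))).head? = some (r0, c0) := by
    apply pv_head_flatMap_pyRange _ bs.toNat 0 bs r0 (r0, c0) (by omega) hr0 hrbs
    · rw [pv_head_filterMap_ite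
        (fun column => column * ts ≤ x ∧ x ≤ (column + 1) * ts ∧
          r0 * ts ≤ y ∧ y ≤ (r0 + 1) * ts) (fun column => (r0, column))]
      rw [pv_head_filter_pyRange _ bs.toNat 0 bs c0 (by omega) hc0 hcbs
        ⟨hc1, hc2, hr1, hr2⟩
        (fun k hk1 hk2 hk => hcmin k hk1 hk2 ⟨hk.1, hk.2.1⟩)]
      rfl
    · intro k hk1 hk2
      have hbad : ¬ (k * ts ≤ y ∧ y ≤ (k + 1) * ts) := hrmin k hk1 hk2
      rw [List.filterMap_eq_nil_iff]
      intro col _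
      simp only [ite_eq_right_iff]
      intro ⟨_, _, h3, h4⟩
      exact absurd ⟨h3, h4⟩ hbad
  simp only [hhead]
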